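-- pv_equiv track=rewrite | github.com/TristanBoucansaud/melodies-generator | Final - Hausdorff.py | pointgauche
-- ===== SOURCE A (Python) =====
-- def pointgauche(L): #Retourne le ou les points avec l'abscisse la plus faible d'un polygone
--     MIG=[L[0]]
--     for k in range(1,len(L)):
--         if L[k][0]<MIG[0][0]:
--             MIG=[L[k]]
--         elif L[k][0]==MIG[0][0]:
--             MIG.append(L[k])
--     return(MIG)
-- ===== SOURCE B (Python) =====
-- def pointgauche(L):
--     xmin = L[0][0]
--     for p in L[1:]:
--         if p[0] < xmin:
--             xmin = p[0]
--     return [p for p in L if p[0] == xmin]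
-- ===== Notes on version B (the rewrite author's own statement) =====
-- stated objective: simpler
-- what changed: Replaces A's single pass with a running candidate-list accumulator (rebuilt/appended as the minimum changes) by two plain passes: compute the minimum x first, then filter the points with that x.
-- outside the precondition, e.g. on pointgauche([]): A raises IndexError, B raises IndexError
import Mathlib
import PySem

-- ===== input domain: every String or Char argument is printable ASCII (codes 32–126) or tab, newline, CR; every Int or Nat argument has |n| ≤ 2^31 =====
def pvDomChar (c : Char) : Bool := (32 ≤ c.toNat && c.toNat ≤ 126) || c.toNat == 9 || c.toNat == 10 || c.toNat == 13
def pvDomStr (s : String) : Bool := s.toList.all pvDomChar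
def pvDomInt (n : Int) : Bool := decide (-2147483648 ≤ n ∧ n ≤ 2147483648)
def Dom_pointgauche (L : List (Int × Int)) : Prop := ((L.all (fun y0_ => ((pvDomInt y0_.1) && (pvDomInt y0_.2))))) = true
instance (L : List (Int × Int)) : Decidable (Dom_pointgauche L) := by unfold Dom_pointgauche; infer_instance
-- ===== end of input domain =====

-- B replaces A's one-pass candidate-list accumulator by two plain passes (min x, then filter); same return value on nonempty lists (both raise IndexError on []).


-- ===== PORT A =====
-- Loop body of A ('for k in range(1,len(L))' with MIG the running candidate list).
-- MIG is never empty in A (it starts as [L[0]]); the '[] => MIG' arm is unreachable.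
def pointgaucheStep (MIG : List (Int × Int)) (Lk : Int × Int) : List (Int × Int) :=
  match MIG with
  | [] => MIG
  | m0 :: _ => if Lk.1 < m0.1 then [Lk] else if Lk.1 = m0.1 then MIG ++ [Lk] else MIG

def pointgauche (L : List (Int × Int)) : List (Int × Int) :=
  match L with
  | [] => []  -- L[0] raises IndexError here; excluded by Pre_pointgauche
  | p0 :: _ =>
    (PySem.List.pyRange 1 (PySem.List.len L) 1).foldl
      (fun MIG j => pointgaucheStep MIG (PySem.List.pyGetD L j (0, 0)))  -- index always in range: pyGetD exact
      [p0]

-- ===== PORT B =====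
def pointgauche_alt (L : List (Int × Int)) : List (Int × Int) :=
  match L with
  | [] => []  -- L[0][0] raises IndexError here; excluded by Pre_pointgauche
  | p0 :: rest =>
    let xmin := rest.foldl (fun m p => if p.1 < m then p.1 else m) p0.1
    L.filter (fun p => p.1 == xmin)

-- ===== PRECONDITION & SPEC =====
-- A raises IndexError on the empty list (L[0]); B raises there too.
def Pre_pointgauche (L : List (Int × Int)) : Prop := L ≠ []
instance (L : List (Int × Int)) : Decidable (Pre_pointgauche L) := by unfold Pre_pointgauche; infer_instance
def pvWitness_pointgauche : (List (Int × Int)) := [(2, 0), (1, 5), (1, 7), (3, 2)]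
def Spec_pointgauche (L : List (Int × Int)) (out : List (Int × Int)) : Prop := out = pointgauche_alt L
instance (L : List (Int × Int)) (out : List (Int × Int)) : Decidable (Spec_pointgauche L out) := by unfold Spec_pointgauche; infer_instance

-- ===== CLAIM (what is proved, stated in full; the proofs are below) =====
def Claim_equal_pointgauche : Prop := ∀ (L : List (Int × Int)), Dom_pointgauche L → Pre_pointgauche L → Spec_pointgauche L (pointgauche L)

-- ===== LEMMAS AND PROOFS =====

-- B's running minimum equals fold of min over x-coordinates
def pvMinFold (t : List (Int × Int)) (x : Int) : Int :=
  t.foldl (fun m p => if p.1 < m then p.1 else m) x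

theorem pvMinFold_le (t : List (Int × Int)) (x : Int) : pvMinFold t x ≤ x := by
  induction t generalizing x with
  | nil => simp [pvMinFold]
  | cons q r ih =>
    simp only [pvMinFold, List.foldl_cons]
    split_ifs with h
    · exact le_trans (ih q.1) (le_of_lt h)
    · exact ih x

-- Invariant of A's loop: with acc nonempty and head x-coordinate x, the fold over the
-- remaining points returns (acc if x stays minimal else nothing) ++ the later points at the minimum.
theorem pvMinFold_eq (t : List (Int × Int)) (x : Int) :
    List.foldl (fun m p => if p.1 < m then p.1 else m) x t = pvMinFold t x := rfl

theorem pointgauche_loop (t : List (Int × Int)) (x : Int) (a : Int × Int) (as : List (Int × Int))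
    (hx : a.1 = x) :
    t.foldl pointgaucheStep (a :: as) =
      (if x = pvMinFold t x then a :: as else []) ++ t.filter (fun q => q.1 == pvMinFold t x) := by
  induction t generalizing x a as with
  | nil => simp [pvMinFold]
  | cons q r ih =>
    have hmin_le : pvMinFold r q.1 ≤ q.1 := pvMinFold_le r q.1
    simp only [List.foldl_cons, pointgaucheStep, hx]
    rcases lt_trichotomy q.1 x with h | h | h
    · -- strictly smaller: restart with [q]
      rw [if_pos h]
      rw [ih q.1 q [] rfl]
      have hm : pvMinFold (q :: r) x = pvMinFold r q.1 := by
        simp only [pvMinFold, List.foldl_cons, if_pos h]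
      rw [hm]
      rw [if_neg (by omega : ¬ x = pvMinFold r q.1)]
      simp only [List.filter_cons, List.nil_append]
      by_cases hq : q.1 = pvMinFold r q.1
      · rw [if_pos hq, if_pos (beq_iff_eq.mpr hq)]; rfl
      · rw [if_neg hq, if_neg (by simpa using hq)]; rfl
    · -- equal: append q
      rw [if_neg (by omega), if_pos h]
      simp only [List.cons_append]
      rw [ih x a (as ++ [q]) hx]
      have hm : pvMinFold (q :: r) x = pvMinFold r x := by
        simp only [pvMinFold, List.foldl_cons, h, if_neg (lt_irrefl x)]
      rw [hm]
      simp only [List.filter_cons]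
      by_cases hxm : x = pvMinFold r x
      · rw [if_pos hxm, if_pos hxm, if_pos (beq_iff_eq.mpr (h.trans hxm))]
        simp
      · rw [if_neg hxm, if_neg hxm, if_neg (by simpa using (h ▸ hxm : ¬ q.1 = pvMinFold r x))]
    · -- strictly larger: unchanged
      rw [if_neg (by omega), if_neg (by omega)]
      rw [ih x a as hx]
      have hm : pvMinFold (q :: r) x = pvMinFold r x := by
        simp only [pvMinFold, List.foldl_cons, if_neg (by omega : ¬ q.1 < x)]
      rw [hm]
      have hqm : ¬ q.1 = pvMinFold r x := by
        have := pvMinFold_le r x; omega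
      simp only [List.filter_cons]
      rw [if_neg (show ¬((q.1 == pvMinFold r x) = true) by simpa using hqm)]

-- ===== VERDICT (by name: the statement is the Claim_ definition above) =====
theorem pointgauche_spec : Claim_equal_pointgauche := by
  intro L _ hpre
  unfold Spec_pointgauche pointgauche pointgauche_alt
  match L with
  | [] => exact absurd rfl hpre
  | p0 :: rest =>
    simp only
    rw [PySem.List.foldl_pyRange_pyGetD (xs := p0 :: rest) (a := 1) (d := (0,0))
          (f := pointgaucheStep) (init := [p0]) (by norm_num)]
    simp only [Int.toNat_one, List.drop_one, List.tail_cons]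
    rw [pointgauche_loop rest p0.1 p0 [] rfl]
    show _ = List.filter _ (p0 :: rest)
    rw [pvMinFold_eq rest p0.1]
    simp only [List.filter_cons]
    by_cases h : p0.1 = pvMinFold rest p0.1
    · rw [if_pos h, if_pos (beq_iff_eq.mpr h)]; rfl
    · rw [if_neg h, if_neg (by simpa using h)]; rfl
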